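-- pv_equiv track=rewrite | github.com/gmanldn/pokertool | src/pokertool/validators/input_sanitizer.py | validate_player_name
-- ===== SOURCE A (Python) =====
-- from typing import Any, Dict, Optional
--
-- def validate_player_name(name: Optional[str]) -> bool:
--     """Validate player name.
--
--     Args:
--         name: Player name to validate
--
--     Returns:
--         True if valid, False otherwise
--     """
--     if not name:
--         return False
--
--     if not isinstance(name, str):
--         return False
--
--     # Max length check
--     if len(name) > 50:
--         return False
--
--     # Check for dangerous characters
--     dangerous_chars = ['<', '>', '"', "'", ';', '&', '|', '`', '$']
--     for char in dangerous_chars: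
--         if char in name:
--             return False
--
--     # Check for script tags
--     if '<script' in name.lower():
--         return False
--
--     # Check for SQL keywords
--     sql_keywords = ['DROP', 'DELETE', 'UPDATE', 'INSERT', 'UNION', 'SELECT']
--     name_upper = name.upper()
--     for keyword in sql_keywords:
--         if keyword in name_upper:
--             return False
--
--     return True
-- ===== SOURCE B (Python) =====
-- # One positional left-to-right scan over the uppercased name: at each index,
-- # test whether any forbidden token (dangerous char or SQL keyword) starts there.
-- # The '<script' rule is redundant (such a name contains the dangerous char '<').
-- FORBIDDEN_TOKENS = ['<', '>', '"', "'", ';', '&', '|', '`', '$',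
--                     'DROP', 'DELETE', 'UPDATE', 'INSERT', 'UNION', 'SELECT']
--
-- def validate_player_name(name):
--     if not isinstance(name, str) or not name or len(name) > 50:
--         return False
--     up = name.upper()
--     for i in range(len(up)):
--         for tok in FORBIDDEN_TOKENS:
--             if up.startswith(tok, i):
--                 return False
--     return True
-- ===== Notes on version B (the rewrite author's own statement) =====
-- stated objective: alternative
-- what changed: B makes one positional scan over the uppercased name, testing at each index whether any forbidden token (dangerous char or SQL keyword) starts there, instead of A's ~16 independent substring scans; A's '<script' test is dropped as redundant since any such name contains the already-rejected dangerous char '<'.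
import Mathlib
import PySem

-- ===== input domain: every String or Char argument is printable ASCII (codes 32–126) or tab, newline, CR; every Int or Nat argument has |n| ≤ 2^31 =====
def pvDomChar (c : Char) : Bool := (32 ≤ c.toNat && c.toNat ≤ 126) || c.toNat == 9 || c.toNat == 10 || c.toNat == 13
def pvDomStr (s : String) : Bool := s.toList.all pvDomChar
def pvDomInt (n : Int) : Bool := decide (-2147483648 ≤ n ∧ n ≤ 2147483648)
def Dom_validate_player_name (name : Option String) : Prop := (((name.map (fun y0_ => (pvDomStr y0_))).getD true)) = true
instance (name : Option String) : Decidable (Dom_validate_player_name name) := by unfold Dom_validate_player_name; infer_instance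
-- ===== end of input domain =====

-- B does one positional scan over the uppercased name, checking at each index whether any
-- forbidden token (dangerous char or SQL keyword) starts there; A's redundant '<script' test
-- is dropped (any such name contains the already-rejected dangerous char '<').

-- ===== PORT A =====
def validate_player_name (name : Option String) : Bool :=
  match name with
  | none => false
  | some s =>
    if s = "" then false
    else if PySem.Str.len s > 50 then false
    else if ["<", ">", "\"", "'", ";", "&", "|", "`", "$"].any
              (fun ch => PySem.Str.isIn ch s) then false
    else if PySem.Str.isIn "<script" (PySem.Str.lower s) then false
    else if ["DROP", "DELETE", "UPDATE", "INSERT", "UNION", "SELECT"].any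
              (fun kw => PySem.Str.isIn kw (PySem.Str.upper s)) then false
    else true

-- ===== PORT B =====
def pvForbiddenTokens : List (List Char) :=
  [['<'], ['>'], ['"'], ['\''], [';'], ['&'], ['|'], ['`'], ['$'],
   "DROP".toList, "DELETE".toList, "UPDATE".toList, "INSERT".toList,
   "UNION".toList, "SELECT".toList]

-- the positional scan: at each suffix, does some forbidden token start here?
def pvScan : List Char → Bool
  | [] => false
  | c :: rest =>
    if pvForbiddenTokens.any (fun t => t.isPrefixOf (c :: rest)) then true
    else pvScan rest

def validate_player_name_alt (name : Option String) : Bool :=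
  match name with
  | none => false
  | some s =>
    if s = "" || PySem.Str.len s > 50 then false
    else !pvScan (PySem.Str.upper s).toList

-- ===== PRECONDITION & SPEC =====
def Spec_validate_player_name (name : Option String) (out : Bool) : Prop := out = validate_player_name_alt name
instance (name : Option String) (out : Bool) : Decidable (Spec_validate_player_name name out) := by unfold Spec_validate_player_name; infer_instance

-- ===== CLAIM (what is proved, stated in full; the proofs are below) =====
def Claim_equal_validate_player_name : Prop := ∀ (name : Option String), Dom_validate_player_name name → Spec_validate_player_name name (validate_player_name name)

-- ===== LEMMAS AND PROOFS =====

-- a one-character string is a substring iff the character occurs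
theorem singleton_infix_iff {c : Char} {l : List Char} : [c] <:+: l ↔ c ∈ l := by
  constructor
  · rintro ⟨p, q, rfl⟩; simp
  · intro h
    rcases List.mem_iff_append.mp h with ⟨p, q, rfl⟩
    exact ⟨p, q, by simp⟩

-- the scan finds exactly the inputs with a forbidden token as infix
theorem pvScan_iff (l : List Char) :
    pvScan l = true ↔ ∃ t ∈ pvForbiddenTokens, t <:+: l := by
  induction l with
  | nil =>
    simp only [pvScan, Bool.false_eq_true, false_iff]
    rintro ⟨t, ht, hinf⟩
    have := List.eq_nil_of_infix_nil hinf
    subst this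
    simp [pvForbiddenTokens] at ht
  | cons c rest ih =>
    simp only [pvScan]
    split_ifs with h
    · simp only [true_iff]
      rcases List.any_eq_true.mp h with ⟨t, ht, hp⟩
      exact ⟨t, ht, (List.isPrefixOf_iff_prefix.mp hp).isInfix⟩
    · rw [ih]
      constructor
      · rintro ⟨t, ht, hinf⟩
        exact ⟨t, ht, List.infix_cons_iff.mpr (Or.inr hinf)⟩
      · rintro ⟨t, ht, hinf⟩
        rcases List.infix_cons_iff.mp hinf with hp | hs
        · exfalso
          apply h
          exact List.any_eq_true.mpr ⟨t, ht, List.isPrefixOf_iff_prefix.mpr hp⟩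
        · exact ⟨t, ht, hs⟩

-- an uppercased character equal to a non-letter target came from that character
theorem upperChar_eq_of_not_letter {c d : Char}
    (hd : ¬ (65 ≤ d.toNat ∧ d.toNat ≤ 90))
    (h : PySem.Chars.upperChar c = d) : c = d := by
  unfold PySem.Chars.upperChar PySem.Chars.islower at h
  split_ifs at h with hl
  · exfalso
    rw [Bool.and_eq_true, decide_eq_true_iff, decide_eq_true_iff] at hl
    have ha : (97 : Nat) ≤ c.toNat := hl.1
    have hz : c.toNat ≤ 122 := hl.2
    have hv : (c.toNat - 32).isValidChar := Or.inl (by omega)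
    have h2 := congrArg Char.toNat h
    rw [Char.toNat_ofNat, if_pos hv] at h2
    omega
  · exact h

-- punctuation membership passes through upper in both directions
theorem mem_upper_iff_not_letter {d : Char}
    (hd1 : ¬ (65 ≤ d.toNat ∧ d.toNat ≤ 90)) (hd2 : ¬ (97 ≤ d.toNat ∧ d.toNat ≤ 122))
    (s : List Char) : d ∈ PySem.Chars.upper s ↔ d ∈ s := by
  unfold PySem.Chars.upper
  constructor
  · intro h
    rcases List.mem_map.mp h with ⟨c, hc, he⟩
    rwa [upperChar_eq_of_not_letter hd1 he] at hc
  · intro h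
    refine List.mem_map.mpr ⟨d, h, ?_⟩
    unfold PySem.Chars.upperChar PySem.Chars.islower
    rw [if_neg]
    intro hl
    rw [Bool.and_eq_true, decide_eq_true_iff, decide_eq_true_iff] at hl
    have ha : (97 : Nat) ≤ d.toNat := hl.1
    have hz : d.toNat ≤ 122 := hl.2
    exact hd2 ⟨ha, hz⟩

-- a lowered character equal to '<' came from '<' itself
theorem lowerChar_eq_lt {c : Char} (h : PySem.Chars.lowerChar c = '<') : c = '<' := by
  unfold PySem.Chars.lowerChar PySem.Chars.isupper at h
  split_ifs at h with hu
  · exfalso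
    rw [Bool.and_eq_true, decide_eq_true_iff, decide_eq_true_iff] at hu
    have hA : (65 : Nat) ≤ c.toNat := hu.1
    have hZ : c.toNat ≤ 90 := hu.2
    have hv : (c.toNat + 32).isValidChar := Or.inl (by omega)
    have h2 := congrArg Char.toNat h
    rw [Char.toNat_ofNat, if_pos hv] at h2
    have h60 : ('<').toNat = 60 := rfl
    omega
  · exact h

-- if '<script' occurs in name.lower(), then '<' occurs in name
theorem script_implies_lt {s : List Char}
    (h : "<script".toList <:+: PySem.Chars.lower s) : '<' ∈ s := by
  have hmem : '<' ∈ PySem.Chars.lower s := by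
    rcases h with ⟨p, q, he⟩
    rw [← he]; simp
  unfold PySem.Chars.lower at hmem
  rcases List.mem_map.mp hmem with ⟨c, hc, hl⟩
  rwa [lowerChar_eq_lt hl] at hc

-- A's combined rejection tests equal B's single scan
theorem scan_eq_tests (s : String) :
    pvScan (PySem.Str.upper s).toList
      = ((["<", ">", "\"", "'", ";", "&", "|", "`", "$"].any
            (fun ch => PySem.Str.isIn ch s))
         || PySem.Str.isIn "<script" (PySem.Str.lower s)
         || (["DROP", "DELETE", "UPDATE", "INSERT", "UNION", "SELECT"].any
               (fun kw => PySem.Str.isIn kw (PySem.Str.upper s)))) := by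
  rw [Bool.eq_iff_iff]
  simp only [Bool.or_eq_true, List.any_eq_true, PySem.Str.isIn_iff_infix,
    PySem.Str.toList_upper, pvScan_iff]
  constructor
  · rintro ⟨t, ht, hinf⟩
    simp only [pvForbiddenTokens, List.mem_cons, List.not_mem_nil, or_false] at ht
    rcases ht with rfl|rfl|rfl|rfl|rfl|rfl|rfl|rfl|rfl|rfl|rfl|rfl|rfl|rfl|rfl
    · exact Or.inl (Or.inl ⟨"<", by simp, singleton_infix_iff.mpr
        ((mem_upper_iff_not_letter (by decide) (by decide) s.toList).mp (singleton_infix_iff.mp hinf))⟩)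
    · exact Or.inl (Or.inl ⟨">", by simp, singleton_infix_iff.mpr
        ((mem_upper_iff_not_letter (by decide) (by decide) s.toList).mp (singleton_infix_iff.mp hinf))⟩)
    · exact Or.inl (Or.inl ⟨"\"", by simp, singleton_infix_iff.mpr
        ((mem_upper_iff_not_letter (by decide) (by decide) s.toList).mp (singleton_infix_iff.mp hinf))⟩)
    · exact Or.inl (Or.inl ⟨"'", by simp, singleton_infix_iff.mpr
        ((mem_upper_iff_not_letter (by decide) (by decide) s.toList).mp (singleton_infix_iff.mp hinf))⟩)
    · exact Or.inl (Or.inl ⟨";", by simp, singleton_infix_iff.mpr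
        ((mem_upper_iff_not_letter (by decide) (by decide) s.toList).mp (singleton_infix_iff.mp hinf))⟩)
    · exact Or.inl (Or.inl ⟨"&", by simp, singleton_infix_iff.mpr
        ((mem_upper_iff_not_letter (by decide) (by decide) s.toList).mp (singleton_infix_iff.mp hinf))⟩)
    · exact Or.inl (Or.inl ⟨"|", by simp, singleton_infix_iff.mpr
        ((mem_upper_iff_not_letter (by decide) (by decide) s.toList).mp (singleton_infix_iff.mp hinf))⟩)
    · exact Or.inl (Or.inl ⟨"`", by simp, singleton_infix_iff.mpr
        ((mem_upper_iff_not_letter (by decide) (by decide) s.toList).mp (singleton_infix_iff.mp hinf))⟩)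
    · exact Or.inl (Or.inl ⟨"$", by simp, singleton_infix_iff.mpr
        ((mem_upper_iff_not_letter (by decide) (by decide) s.toList).mp (singleton_infix_iff.mp hinf))⟩)
    · exact Or.inr ⟨"DROP", by simp, hinf⟩
    · exact Or.inr ⟨"DELETE", by simp, hinf⟩
    · exact Or.inr ⟨"UPDATE", by simp, hinf⟩
    · exact Or.inr ⟨"INSERT", by simp, hinf⟩
    · exact Or.inr ⟨"UNION", by simp, hinf⟩
    · exact Or.inr ⟨"SELECT", by simp, hinf⟩
  · rintro ((⟨ch, hch, hinf⟩ | hscript) | ⟨kw, hkw, hinf⟩)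
    · fin_cases hch
      · exact ⟨['<'], by decide, singleton_infix_iff.mpr
          ((mem_upper_iff_not_letter (by decide) (by decide) s.toList).mpr
            (singleton_infix_iff.mp (by simpa using hinf)))⟩
      · exact ⟨['>'], by decide, singleton_infix_iff.mpr
          ((mem_upper_iff_not_letter (by decide) (by decide) s.toList).mpr
            (singleton_infix_iff.mp (by simpa using hinf)))⟩
      · exact ⟨['"'], by decide, singleton_infix_iff.mpr
          ((mem_upper_iff_not_letter (by decide) (by decide) s.toList).mpr
            (singleton_infix_iff.mp (by simpa using hinf)))⟩
      · exact ⟨['\''], by decide, singleton_infix_iff.mpr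
          ((mem_upper_iff_not_letter (by decide) (by decide) s.toList).mpr
            (singleton_infix_iff.mp (by simpa using hinf)))⟩
      · exact ⟨[';'], by decide, singleton_infix_iff.mpr
          ((mem_upper_iff_not_letter (by decide) (by decide) s.toList).mpr
            (singleton_infix_iff.mp (by simpa using hinf)))⟩
      · exact ⟨['&'], by decide, singleton_infix_iff.mpr
          ((mem_upper_iff_not_letter (by decide) (by decide) s.toList).mpr
            (singleton_infix_iff.mp (by simpa using hinf)))⟩
      · exact ⟨['|'], by decide, singleton_infix_iff.mpr
          ((mem_upper_iff_not_letter (by decide) (by decide) s.toList).mpr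
            (singleton_infix_iff.mp (by simpa using hinf)))⟩
      · exact ⟨['`'], by decide, singleton_infix_iff.mpr
          ((mem_upper_iff_not_letter (by decide) (by decide) s.toList).mpr
            (singleton_infix_iff.mp (by simpa using hinf)))⟩
      · exact ⟨['$'], by decide, singleton_infix_iff.mpr
          ((mem_upper_iff_not_letter (by decide) (by decide) s.toList).mpr
            (singleton_infix_iff.mp (by simpa using hinf)))⟩
    · rw [PySem.Str.toList_lower] at hscript
      exact ⟨['<'], by decide, singleton_infix_iff.mpr
        ((mem_upper_iff_not_letter (by decide) (by decide) s.toList).mpr (script_implies_lt hscript))⟩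
    · fin_cases hkw
      · exact ⟨"DROP".toList, by decide, by simpa using hinf⟩
      · exact ⟨"DELETE".toList, by decide, by simpa using hinf⟩
      · exact ⟨"UPDATE".toList, by decide, by simpa using hinf⟩
      · exact ⟨"INSERT".toList, by decide, by simpa using hinf⟩
      · exact ⟨"UNION".toList, by decide, by simpa using hinf⟩
      · exact ⟨"SELECT".toList, by decide, by simpa using hinf⟩

theorem main_eq (name : Option String) :
    validate_player_name name = validate_player_name_alt name := by
  match name with
  | none => rfl
  | some s =>
    show (if s = "" then false
      else if PySem.Str.len s > 50 then false
      else if ["<", ">", "\"", "'", ";", "&", "|", "`", "$"].any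
                (fun ch => PySem.Str.isIn ch s) then false
      else if PySem.Str.isIn "<script" (PySem.Str.lower s) then false
      else if ["DROP", "DELETE", "UPDATE", "INSERT", "UNION", "SELECT"].any
                (fun kw => PySem.Str.isIn kw (PySem.Str.upper s)) then false
      else true)
      = (if s = "" || PySem.Str.len s > 50 then false
      else !pvScan (PySem.Str.upper s).toList)
    by_cases he : s = ""
    · simp [he]
    · rw [if_neg he]
      simp only [decide_eq_false he, Bool.false_or]
      by_cases hlen : PySem.Str.len s > 50
      · rw [if_pos hlen, if_pos (decide_eq_true hlen)]
      · simp only [if_neg hlen, decide_eq_false hlen, Bool.false_eq_true, if_false]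
        rw [scan_eq_tests]
        by_cases h1 : (["<", ">", "\"", "'", ";", "&", "|", "`", "$"].any
            (fun ch => PySem.Str.isIn ch s)) = true
        · simp only [h1, if_true, Bool.true_or, Bool.not_true]
        · simp only [Bool.not_eq_true] at h1
          simp only [h1, Bool.false_eq_true, if_false, Bool.false_or]
          by_cases h2 : PySem.Str.isIn "<script" (PySem.Str.lower s) = true
          · simp only [h2, if_true, Bool.true_or, Bool.not_true]
          · simp only [Bool.not_eq_true] at h2
            simp only [h2, Bool.false_eq_true, if_false, Bool.false_or]
            cases h3 : (["DROP", "DELETE", "UPDATE", "INSERT", "UNION", "SELECT"].any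
                (fun kw => PySem.Str.isIn kw (PySem.Str.upper s))) <;>
              simp only [if_false, Bool.not_true,
                Bool.not_false, Bool.false_eq_true, if_true]

-- ===== VERDICT (by name: the statement is the Claim_ definition above) =====
theorem validate_player_name_spec : Claim_equal_validate_player_name := by
  intro name _
  unfold Spec_validate_player_name
  exact main_eq name
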